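-- pv_equiv track=rewrite | github.com/JMY-Dev-Team/GenshinOJ | receive.py | generate_session_token
-- ===== SOURCE A (Python) =====
-- def generate_session_token(session_token_seed: int):
--     if session_token_seed > 1:
--         generated_session_token = ''
--         generated_session_token = generated_session_token                      \
--                                   +                                            \
--                                   chr(session_token_seed * 1  % 26 + ord('a')) \
--                                   +                                            \
--                                   chr(session_token_seed * 3  % 26 + ord('a')) \
--                                   +                                            \
--                                   chr(session_token_seed * 5  % 26 + ord('a')) \
--                                   +                                            \
--                                   chr(session_token_seed * 7  % 26 + ord('a')) \
--                                   +                                            \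
--                                   chr(session_token_seed * 9  % 26 + ord('a')) \
--                                   +                                            \
--                                   chr(session_token_seed * 11 % 26 + ord('a')) \
--                                   +                                            \
--                                   chr(session_token_seed * 13 % 26 + ord('a')) \
--                                   +                                            \
--                                   chr(session_token_seed * 15 % 26 + ord('a'))
--
--         return generated_session_token + generate_session_token(int(session_token_seed / 5))
--     else:
--         return 's'
-- ===== SOURCE B (Python) =====
-- def generate_session_token(session_token_seed: int):
--     parts = []
--     s = session_token_seed
--     while s > 1:
--         parts.append(''.join(chr(s * m % 26 + ord('a')) for m in range(1, 16, 2)))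
--         s = int(s / 5)
--     parts.append('s')
--     return ''.join(parts)
-- ===== Notes on version B (the rewrite author's own statement) =====
-- stated objective: alternative
-- what changed: Replaces A's recursion (eight hand-written string concatenations per level) by an iterative while-loop that appends one eight-character chunk per iteration, built by a comprehension over the odd multipliers, and joins all the chunks once at the end.
import Mathlib
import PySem

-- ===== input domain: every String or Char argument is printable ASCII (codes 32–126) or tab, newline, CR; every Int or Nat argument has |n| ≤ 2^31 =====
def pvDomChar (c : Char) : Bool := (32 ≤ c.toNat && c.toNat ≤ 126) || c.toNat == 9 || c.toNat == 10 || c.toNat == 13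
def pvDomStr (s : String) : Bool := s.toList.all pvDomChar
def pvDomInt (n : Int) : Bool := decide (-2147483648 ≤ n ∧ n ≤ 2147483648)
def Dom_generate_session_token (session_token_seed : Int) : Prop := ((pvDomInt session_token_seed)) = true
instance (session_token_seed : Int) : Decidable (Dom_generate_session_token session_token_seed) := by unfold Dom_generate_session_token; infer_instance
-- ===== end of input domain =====

-- B replaces A's recursion by an iterative accumulator loop (collect 8-char chunks in a list, join once); same return value, no speed claim.

-- chr(x % 26 + ord('a')) as a one-character string (Python chr gives a length-1 str); used by both ports.
def pvChr (x : Int) : String := String.ofList [Char.ofNat (PySem.Int.mod x 26 + 97).toNat]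

-- ===== PORT A =====
-- A's recursion: 8 explicit concatenations then recurse on int(seed / 5).
-- Python's int(seed / 5) (float division, truncation) equals floor division here: the
-- recursive call only happens for seed > 1, and for 0 ≤ seed ≤ 2^31 (Dom) the double
-- rounding of seed/5 never crosses an integer, so int(seed/5) = seed // 5 = floordiv.
def generate_session_token (session_token_seed : Int) : String :=
  if session_token_seed > 1 then
    let generated_session_token := ""
    let generated_session_token := generated_session_token
      ++ pvChr (session_token_seed * 1)
      ++ pvChr (session_token_seed * 3)
      ++ pvChr (session_token_seed * 5)
      ++ pvChr (session_token_seed * 7)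
      ++ pvChr (session_token_seed * 9)
      ++ pvChr (session_token_seed * 11)
      ++ pvChr (session_token_seed * 13)
      ++ pvChr (session_token_seed * 15)
    generated_session_token ++ generate_session_token (PySem.Int.floordiv session_token_seed 5)
  else "s"
termination_by session_token_seed.toNat
decreasing_by
  rw [PySem.Int.floordiv_eq_ediv_of_pos (by norm_num)]
  omega

-- ===== PORT B =====
-- ''.join(chr(s * m % 26 + ord('a')) for m in range(1, 16, 2))
def pvChunk_alt (s : Int) : String :=
  PySem.Str.join "" ((PySem.List.pyRange 1 16 2).map (fun m => pvChr (s * m)))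

-- the while loop: parts is the accumulator list, s the current seed
def pvLoop_alt (s : Int) (parts : List String) : List String :=
  if s > 1 then pvLoop_alt (PySem.Int.floordiv s 5) (parts ++ [pvChunk_alt s])
  else parts ++ ["s"]
termination_by s.toNat
decreasing_by
  rw [PySem.Int.floordiv_eq_ediv_of_pos (by norm_num)]
  omega

def generate_session_token_alt (session_token_seed : Int) : String :=
  PySem.Str.join "" (pvLoop_alt session_token_seed [])

-- ===== PRECONDITION & SPEC =====
def Spec_generate_session_token (session_token_seed : Int) (out : String) : Prop := out = generate_session_token_alt session_token_seed
instance (session_token_seed : Int) (out : String) : Decidable (Spec_generate_session_token session_token_seed out) := by unfold Spec_generate_session_token; infer_instance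

-- ===== CLAIM (what is proved, stated in full; the proofs are below) =====
def Claim_equal_generate_session_token : Prop := ∀ (session_token_seed : Int), Dom_generate_session_token session_token_seed → Spec_generate_session_token session_token_seed (generate_session_token session_token_seed)

-- ===== LEMMAS AND PROOFS =====

theorem pv_flat_intersperse_nil (l : List (List Char)) :
    (List.intersperse ([] : List Char) l).flatten = l.flatten := by
  induction l with
  | nil => rfl
  | cons a t ih =>
    cases t with
    | nil => rfl
    | cons b r => simp_all [List.intersperse]

theorem pv_join_append (xs : List String) (x : String) :
    PySem.Str.join "" (xs ++ [x]) = PySem.Str.join "" xs ++ x := by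
  apply String.toList_inj.mp
  simp [PySem.Str.toList_join, PySem.Chars.join, List.intercalate, pv_flat_intersperse_nil]

theorem pv_chunk_eq (s : Int) :
    pvChunk_alt s = "" ++ pvChr (s * 1) ++ pvChr (s * 3) ++ pvChr (s * 5) ++ pvChr (s * 7)
      ++ pvChr (s * 9) ++ pvChr (s * 11) ++ pvChr (s * 13) ++ pvChr (s * 15) := by
  have hr : PySem.List.pyRange 1 16 2 = [1,3,5,7,9,11,13,15] := by decide
  apply String.toList_inj.mp
  simp [pvChunk_alt, hr, PySem.Str.toList_join, PySem.Chars.join, List.intercalate, pvChr,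
    List.intersperse]

theorem pv_loop_eq (s : Int) (parts : List String) :
    PySem.Str.join "" (pvLoop_alt s parts) =
      PySem.Str.join "" parts ++ generate_session_token s := by
  induction s, parts using pvLoop_alt.induct with
  | case1 s parts h ih =>
    rw [pvLoop_alt, if_pos h, ih, pv_join_append]
    conv_rhs => rw [generate_session_token, if_pos h]
    rw [pv_chunk_eq]
    simp [String.append_assoc]
  | case2 s parts h =>
    rw [pvLoop_alt, if_neg h, pv_join_append,
        generate_session_token, if_neg h]

-- ===== VERDICT (by name: the statement is the Claim_ definition above) =====
theorem generate_session_token_spec : Claim_equal_generate_session_token := by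
  intro s _
  unfold Spec_generate_session_token generate_session_token_alt
  rw [pv_loop_eq]
  apply String.toList_inj.mp
  simp [PySem.Str.toList_join, PySem.Chars.join, List.intercalate]
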